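-- pv_equiv track=rewrite | github.com/AC-Ramillies/betterstreet-precompte | betterstreet_to_precompte_v5.py | rebuild_records_by_id
-- ===== SOURCE A (Python) =====
-- from typing import Optional, Dict, List, Tuple, Any
--
-- def rebuild_records_by_id(lines: List[str], delimiter: str = ";") -> List[str]:
--     """
--     Recolle les retours à la ligne dans les champs textes.
--     Nouveau record si le 1er champ commence par BE-.
--     """
--     if not lines:
--         return []
--
--     i = 0
--     while i < len(lines) and not lines[i].strip():
--         i += 1
--     if i >= len(lines):
--         return []
--
--     header = lines[i].rstrip("\n")
--     rebuilt = [header]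
--
--     current: Optional[str] = None
--     for raw in lines[i + 1 :]:
--         line = raw.rstrip("\n")
--         if not line.strip():
--             continue
--
--         first = line.split(delimiter, 1)[0]
--         first = first.replace("\ufeff", "").strip().strip('"').strip("'")
--
--         if first.startswith("BE-"):
--             if current is not None:
--                 rebuilt.append(current)
--             current = line
--         else:
--             if current is None:
--                 continue
--             current += " " + line
--
--     if current is not None:
--         rebuilt.append(current)
--
--     return rebuilt
-- ===== SOURCE B (Python) =====
-- from typing import List
--
-- def _is_start(line: str, delimiter: str) -> bool:
--     first = line.split(delimiter, 1)[0]
--     first = first.replace("\ufeff", "").strip().strip('"').strip("'")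
--     return first.startswith("BE-")
--
-- def rebuild_records_by_id(lines: List[str], delimiter: str = ";") -> List[str]:
--     cleaned = [l.rstrip("\n") for l in lines if l.strip()]
--     if not cleaned:
--         return []
--     header, body = cleaned[0], cleaned[1:]
--     records: List[str] = []
--     tail: List[str] = []
--     for line in reversed(body):
--         if _is_start(line, delimiter):
--             records.append(" ".join([line] + tail[::-1]))
--             tail = []
--         else:
--             tail.append(line)
--     records.reverse()
--     return [header] + records
-- ===== Notes on version B (the rewrite author's own statement) =====
-- stated objective: alternative
-- what changed: A's single forward pass with an Optional `current` string accumulator and interleaved blank-line skipping is replaced by a clean/filter prepass followed by a backwards pass over the body that builds each record from its start line plus the buffered continuation lines.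
import Mathlib
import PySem

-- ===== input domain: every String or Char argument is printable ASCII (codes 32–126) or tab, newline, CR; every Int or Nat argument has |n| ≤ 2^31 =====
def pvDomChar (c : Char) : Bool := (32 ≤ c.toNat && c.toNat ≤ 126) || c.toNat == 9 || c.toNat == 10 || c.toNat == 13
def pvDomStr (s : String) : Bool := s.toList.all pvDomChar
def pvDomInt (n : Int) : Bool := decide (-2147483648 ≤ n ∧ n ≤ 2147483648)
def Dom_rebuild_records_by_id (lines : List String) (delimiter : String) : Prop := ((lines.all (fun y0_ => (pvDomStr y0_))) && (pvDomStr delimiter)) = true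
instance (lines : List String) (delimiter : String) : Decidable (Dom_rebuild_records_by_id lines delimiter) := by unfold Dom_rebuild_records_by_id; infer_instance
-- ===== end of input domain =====

-- B replaces A's single pass with Optional `current` string accumulation by a clean/filter prepass
-- and a backwards pass over the body that builds each record from its start line and buffered
-- continuation lines (objective: alternative decomposition, same cost).

-- shared helper: exact port of Python's s.rstrip("\n")
def pyRstripNL (s : String) : String := String.ofList ((s.toList.reverse.dropWhile (· == '\n')).reverse)

-- ===== PORT A =====
-- A's `while i < len(lines) and not lines[i].strip()` prefix skip
def pvSkipBlankA : List String → List String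
  | [] => []
  | l :: ls => if PySem.Str.strip l = "" then pvSkipBlankA ls else l :: ls

-- the cleaned first field, a subexpression verbatim in both Pythons: split once on the delimiter,
-- drop BOM, strip whitespace, then '"' and "'"
def pvFirstClean (delimiter line : String) : String :=
  let first0 := match PySem.Str.splitMax? line delimiter 1 with
    | some (f :: _) => f
    | _ => ""   -- unreachable under Pre_ (delimiter ≠ "" gives some, and split results are nonempty)
  PySem.Str.stripChars (PySem.Str.stripChars (PySem.Str.strip (PySem.Str.replace first0 "\ufeff" "")) "\"") "'"

-- A's loop body after the blank test: classify the cleaned first field, update (rebuilt, current)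
def pvStepCore (delimiter : String) (st : List String × Option String) (line : String) : List String × Option String :=
  if PySem.Str.startswith (pvFirstClean delimiter line) "BE-" then
    match st.2 with
    | some c => (st.1 ++ [c], some line)
    | none => (st.1, some line)
  else
    match st.2 with
    | none => st
    | some c => (st.1, some (c ++ " " ++ line))

def pvStepA (delimiter : String) (st : List String × Option String) (raw : String) : List String × Option String :=
  let line := pyRstripNL raw
  if PySem.Str.strip line = "" then st else pvStepCore delimiter st line

def rebuild_records_by_id (lines : List String) (delimiter : String) : List String :=
  match pvSkipBlankA lines with
  | [] => []
  | h :: rest =>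
    let header := pyRstripNL h
    let res := rest.foldl (pvStepA delimiter) ([header], none)
    match res.2 with
    | some c => res.1 ++ [c]
    | none => res.1

-- ===== PORT B =====
-- Source B's _is_start
def pvIsStart (delimiter line : String) : Bool :=
  PySem.Str.startswith (pvFirstClean delimiter line) "BE-"

-- Source B's loop body over reversed(body), state (records, tail); tail[::-1] is List.reverse
def pvStepB (delimiter : String) (st : List String × List String) (line : String) : List String × List String :=
  if pvIsStart delimiter line then
    (st.1 ++ [PySem.Str.join " " ([line] ++ st.2.reverse)], [])
  else
    (st.1, st.2 ++ [line])

def rebuild_records_by_id_alt (lines : List String) (delimiter : String) : List String :=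
  let cleaned := (lines.filter (fun l => !(PySem.Str.strip l == ""))).map pyRstripNL
  match cleaned with
  | [] => []
  | header :: body =>
    let res := (body.reverse).foldl (pvStepB delimiter) ([], [])
    header :: res.1.reverse

-- ===== PRECONDITION & SPEC =====
-- Pre_ excludes exactly the inputs on which A raises: an empty delimiter together with at least
-- one non-blank line after the first non-blank line, on which Python's str.split raises ValueError.
def Pre_rebuild_records_by_id (lines : List String) (delimiter : String) : Prop :=
  delimiter ≠ "" ∨
    ((List.dropWhile (fun l => PySem.Str.strip l == "") lines).tail.all
      (fun l => PySem.Str.strip l == "")) = true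
instance (lines : List String) (delimiter : String) : Decidable (Pre_rebuild_records_by_id lines delimiter) := by unfold Pre_rebuild_records_by_id; infer_instance
def pvWitness_rebuild_records_by_id : List String × String := (["id;name", "BE-1;a\n", "cont", "BE-2;b"], ";")

def Spec_rebuild_records_by_id (lines : List String) (delimiter : String) (out : List String) : Prop := out = rebuild_records_by_id_alt lines delimiter
instance (lines : List String) (delimiter : String) (out : List String) : Decidable (Spec_rebuild_records_by_id lines delimiter out) := by unfold Spec_rebuild_records_by_id; infer_instance

-- ===== CLAIM (what is proved, stated in full; the proofs are below) =====
def Claim_equal_rebuild_records_by_id : Prop := ∀ (lines : List String) (delimiter : String), Dom_rebuild_records_by_id lines delimiter → Pre_rebuild_records_by_id lines delimiter → Spec_rebuild_records_by_id lines delimiter (rebuild_records_by_id lines delimiter)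

-- ===== LEMMAS AND PROOFS =====

def pvGrpS (d : String) (cur : String) : List String → List String
  | [] => [cur]
  | l :: ls => if pvIsStart d l then cur :: pvGrpS d l ls else pvGrpS d (cur ++ " " ++ l) ls

def pvRecsS (d : String) : List String → List String
  | [] => []
  | l :: ls => if pvIsStart d l then pvGrpS d l ls else pvRecsS d ls

def pvFinish (st : List String × Option String) : List String :=
  match st.2 with
  | some c => st.1 ++ [c]
  | none => st.1

theorem pvStepCore_some (d : String) (reb : List String) (c line : String) :
    pvStepCore d (reb, some c) line =
      if pvIsStart d line then (reb ++ [c], some line) else (reb, some (c ++ " " ++ line)) := by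
  simp only [pvStepCore, pvIsStart]
  split <;> rfl

theorem pvStepCore_none (d : String) (reb : List String) (line : String) :
    pvStepCore d (reb, none) line =
      if pvIsStart d line then (reb, some line) else (reb, none) := by
  simp only [pvStepCore, pvIsStart]
  split <;> rfl

theorem pvFoldCore_some (d : String) (ls : List String) :
    ∀ (c : String) (reb : List String),
      pvFinish (ls.foldl (pvStepCore d) (reb, some c)) = reb ++ pvGrpS d c ls := by
  induction ls with
  | nil => intro c reb; rfl
  | cons l ls ih =>
    intro c reb
    rw [List.foldl_cons, pvStepCore_some, pvGrpS]
    by_cases h : pvIsStart d l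
    · rw [if_pos h, if_pos h, ih l (reb ++ [c])]
      simp
    · rw [if_neg h, if_neg h, ih (c ++ " " ++ l) reb]

theorem pvFoldCore_none (d : String) (ls : List String) :
    ∀ (reb : List String),
      pvFinish (ls.foldl (pvStepCore d) (reb, none)) = reb ++ pvRecsS d ls := by
  induction ls with
  | nil => intro reb; simp [pvFinish, pvRecsS]
  | cons l ls ih =>
    intro reb
    rw [List.foldl_cons, pvStepCore_none, pvRecsS]
    by_cases h : pvIsStart d l
    · rw [if_pos h, if_pos h, pvFoldCore_some d ls l reb]
    · rw [if_neg h, if_neg h, ih reb]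
theorem pvJoin_singleton (sep c : String) : PySem.Str.join sep [c] = c := by
  apply String.toList_inj.mp
  simp [PySem.Str.toList_join, PySem.Chars.join_singleton]

theorem pvJoin_glue (c l : String) (rest : List String) :
    PySem.Str.join " " ((c ++ " " ++ l) :: rest) = PySem.Str.join " " (c :: l :: rest) := by
  apply String.toList_inj.mp
  simp only [PySem.Str.toList_join, List.map_cons, String.toList_append]
  cases rest with
  | nil =>
    simp [PySem.Chars.join_singleton, PySem.Chars.join_cons_cons, List.append_assoc]
  | cons r rs =>
    simp [PySem.Chars.join_cons_cons, List.append_assoc]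

theorem pvGrpS_decomp (d : String) (ls : List String) :
    ∀ c : String,
      pvGrpS d c ls =
        PySem.Str.join " " (c :: ls.takeWhile (fun x => !pvIsStart d x)) :: pvRecsS d ls := by
  induction ls with
  | nil => intro c; simp [pvGrpS, pvRecsS, pvJoin_singleton]
  | cons l ls ih =>
    intro c
    rw [pvGrpS, pvRecsS]
    by_cases h : pvIsStart d l
    · rw [if_pos h, if_pos h, List.takeWhile_cons_of_neg (by simp [h]), pvJoin_singleton, ih l]
    · rw [if_neg h, if_neg h, List.takeWhile_cons_of_pos (by simp [h]), ih (c ++ " " ++ l),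
        pvJoin_glue]

theorem pvFoldB (d : String) (body : List String) :
    body.foldr (fun l st => pvStepB d st l) ([], []) =
      ((pvRecsS d body).reverse, (body.takeWhile (fun x => !pvIsStart d x)).reverse) := by
  induction body with
  | nil => simp [pvRecsS]
  | cons l ls ih =>
    rw [List.foldr_cons, ih, pvRecsS]
    by_cases h : pvIsStart d l
    · rw [if_pos h, List.takeWhile_cons_of_neg (by simp [h])]
      simp only [pvStepB, h, if_pos, List.reverse_reverse, List.singleton_append]
      rw [pvGrpS_decomp d ls l]
      simp
    · rw [if_neg h, List.takeWhile_cons_of_pos (by simp [h])]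
      simp [pvStepB, h]
theorem pvDropWhile_forall_imp {p q : Char → Bool} (hq : ∀ c, q c = true → p c = true)
    (l : List Char) : (∀ c ∈ l.dropWhile q, p c) ↔ (∀ c ∈ l, p c) := by
  induction l with
  | nil => simp
  | cons a l ih =>
    by_cases h : q a
    · rw [List.dropWhile_cons_of_pos h]
      simp only [List.mem_cons, forall_eq_or_imp]
      constructor
      · intro hd; exact ⟨hq a h, ih.mp hd⟩
      · intro hd; exact ih.mpr hd.2
    · rw [List.dropWhile_cons_of_neg h]

theorem pvStripStr_blank_iff (t : String) :
    (PySem.Str.strip t = "") ↔ ∀ c ∈ t.toList, PySem.Chars.isspace c := by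
  rw [← String.toList_inj]
  have h0 : ("" : String).toList = [] := rfl
  rw [PySem.Str.toList_strip, h0]
  simp only [PySem.Chars.strip, PySem.Chars.rstrip, PySem.Chars.lstrip,
    List.reverse_eq_nil_iff, List.dropWhile_eq_nil_iff, List.mem_reverse]
  exact pvDropWhile_forall_imp (fun c h => h) t.toList

theorem pvStrip_rstripNL_blank (s : String) :
    (PySem.Str.strip (pyRstripNL s) = "") ↔ (PySem.Str.strip s = "") := by
  rw [pvStripStr_blank_iff, pvStripStr_blank_iff]
  simp only [pyRstripNL, String.toList_ofList, List.mem_reverse]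
  have h2 := pvDropWhile_forall_imp (p := PySem.Chars.isspace) (q := fun c => c == '\n')
    (fun c h => by
      have hc : c = '\n' := by simpa using h
      subst hc; decide)
    s.toList.reverse
  simpa [List.mem_reverse] using h2

def pvCleanL (xs : List String) : List String :=
  (xs.filter (fun l => !(PySem.Str.strip l == ""))).map pyRstripNL

theorem pvFoldA_clean (d : String) (xs : List String) (st : List String × Option String) :
    xs.foldl (pvStepA d) st = (pvCleanL xs).foldl (pvStepCore d) st := by
  induction xs generalizing st with
  | nil => simp [pvCleanL]
  | cons raw xs ih =>
    by_cases h : PySem.Str.strip raw = ""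
    · have h2 : PySem.Str.strip (pyRstripNL raw) = "" := (pvStrip_rstripNL_blank raw).mpr h
      have hc : pvCleanL (raw :: xs) = pvCleanL xs := by
        simp [pvCleanL, h]
      rw [hc, List.foldl_cons]
      rw [show pvStepA d st raw = st by simp [pvStepA, h2]]
      exact ih st
    · have h2 : ¬ (PySem.Str.strip (pyRstripNL raw) = "") :=
        fun hh => h ((pvStrip_rstripNL_blank raw).mp hh)
      have hc : pvCleanL (raw :: xs) = pyRstripNL raw :: pvCleanL xs := by
        simp [pvCleanL, h]
      rw [hc, List.foldl_cons, List.foldl_cons]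
      rw [show pvStepA d st raw = pvStepCore d st (pyRstripNL raw) by simp [pvStepA, h2]]
      exact ih _

theorem pvCleanL_skip (lines : List String) :
    pvCleanL lines =
      (match pvSkipBlankA lines with
       | [] => []
       | h :: rest => pyRstripNL h :: pvCleanL rest) := by
  induction lines with
  | nil => rfl
  | cons l ls ih =>
    by_cases h : PySem.Str.strip l = ""
    · rw [show pvSkipBlankA (l :: ls) = pvSkipBlankA ls by simp [pvSkipBlankA, h],
        show pvCleanL (l :: ls) = pvCleanL ls by simp [pvCleanL, h], ih]
    · rw [show pvSkipBlankA (l :: ls) = l :: ls by simp [pvSkipBlankA, h]]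
      simp [pvCleanL, h]

-- ===== VERDICT (by name: the statement is the Claim_ definition above) =====
theorem rebuild_records_by_id_spec : Claim_equal_rebuild_records_by_id := by
  intro lines delimiter _ _
  unfold Spec_rebuild_records_by_id rebuild_records_by_id rebuild_records_by_id_alt
  rw [show ((lines.filter (fun l => !(PySem.Str.strip l == ""))).map pyRstripNL) = pvCleanL lines from rfl,
      pvCleanL_skip lines]
  cases h : pvSkipBlankA lines with
  | nil => rfl
  | cons hd rest =>
    simp only
    rw [List.foldl_reverse, pvFoldB, pvFoldA_clean]
    have hmain := pvFoldCore_none delimiter (pvCleanL rest) [pyRstripNL hd]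
    simp only [pvFinish] at hmain
    cases hres : (pvCleanL rest).foldl (pvStepCore delimiter) ([pyRstripNL hd], none) with
    | mk r1 r2 =>
      rw [hres] at hmain
      cases r2 <;> simp_all
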